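-- pv_equiv track=rewrite | github.com/StoolSamples/SiN-Serve-FileTransferEngine | receiver.py | _chunks_to_ranges
-- ===== SOURCE A (Python) =====
-- from typing import Dict, List, Optional, Set, Tuple
--
-- def _chunks_to_ranges(chunk_ids: List[int]) -> List[Tuple[int, int]]:
--     """
--     Convert a sorted list of chunk IDs into run-length encoded ranges.
--
--     Example: [0,1,2,5,6,10] → [(0,3),(5,2),(10,1)]
--
--     chunk_ids MUST be sorted ascending before calling this function.
--     """
--     if not chunk_ids:
--         return []
--     ranges: List[Tuple[int, int]] = []
--     start = chunk_ids[0]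
--     run   = 1
--     for cid in chunk_ids[1:]:
--         if cid == start + run:
--             run += 1
--         else:
--             ranges.append((start, run))
--             start = cid
--             run   = 1
--     ranges.append((start, run))
--     return ranges
-- ===== SOURCE B (Python) =====
-- from typing import Dict, List, Optional, Set, Tuple
--
-- def _chunks_to_ranges(chunk_ids: List[int]) -> List[Tuple[int, int]]:
--     # Group by the "value minus index" key: within a consecutive run the key
--     # v - i is constant, so each maximal run is one slice found by scanning
--     # forward while the key matches.  No running start/run counters.
--     pairs = list(enumerate(chunk_ids))
--     ranges: List[Tuple[int, int]] = []
--     pos = 0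
--     n = len(pairs)
--     while pos < n:
--         i, v = pairs[pos]
--         key = v - i
--         end = pos + 1
--         while end < n and pairs[end][1] - pairs[end][0] == key:
--             end += 1
--         ranges.append((v, end - pos))
--         pos = end
--     return ranges
-- ===== Notes on version B (the rewrite author's own statement) =====
-- stated objective: alternative
-- what changed: B enumerates the list and groups maximal runs by the constant value-minus-index key (an outer scan that takes a whole run per step), instead of A's single loop maintaining start/run counters.
import Mathlib
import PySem

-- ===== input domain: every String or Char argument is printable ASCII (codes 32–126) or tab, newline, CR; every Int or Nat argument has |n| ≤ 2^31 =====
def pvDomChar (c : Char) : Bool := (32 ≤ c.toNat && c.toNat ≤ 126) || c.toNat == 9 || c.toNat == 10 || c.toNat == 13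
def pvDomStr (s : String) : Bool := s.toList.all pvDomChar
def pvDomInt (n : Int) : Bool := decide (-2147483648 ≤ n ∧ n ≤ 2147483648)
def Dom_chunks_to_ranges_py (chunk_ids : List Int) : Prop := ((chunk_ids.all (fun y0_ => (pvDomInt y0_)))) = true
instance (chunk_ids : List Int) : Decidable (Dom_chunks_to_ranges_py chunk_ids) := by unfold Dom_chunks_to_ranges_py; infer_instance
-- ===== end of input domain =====

-- B groups maximal runs via the value-minus-index key over the enumerated list,
-- replacing A's start/run counters; alternative decomposition, same cost.


-- ===== PORT A =====
-- the loop body of A: state = (ranges, start, run)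
def pvStepA (st : List (Int × Int) × Int × Int) (cid : Int) : List (Int × Int) × Int × Int :=
  if cid = st.2.1 + st.2.2 then (st.1, st.2.1, st.2.2 + 1)
  else (st.1 ++ [(st.2.1, st.2.2)], cid, 1)

def chunks_to_ranges_py (chunk_ids : List Int) : List (Int × Int) :=
  match chunk_ids with
  | [] => []
  | c0 :: rest =>
    let st := rest.foldl pvStepA ([], c0, 1)
    st.1 ++ [(st.2.1, st.2.2)]

-- ===== PORT B =====
-- list(enumerate(chunk_ids)) with Python's int index
def pvEnum (i : Int) : List Int → List (Int × Int)
  | [] => []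
  | v :: vs => (i, v) :: pvEnum (i + 1) vs

-- the outer while loop of B: take one maximal group per step (the inner while
-- scanning forward while the key matches is takeWhile/dropWhile)
def pvChunkB : List (Int × Int) → List (Int × Int)
  | [] => []
  | (i, v) :: rest =>
    ((v, 1 + ((rest.takeWhile (fun q => q.2 - q.1 = v - i)).length : Int))
      :: pvChunkB (rest.dropWhile (fun q => q.2 - q.1 = v - i)))
termination_by xs => xs.length
decreasing_by
  simp only [List.length_cons]
  exact Nat.lt_succ_of_le (List.length_dropWhile_le _ _)

def chunks_to_ranges_py_alt (chunk_ids : List Int) : List (Int × Int) :=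
  pvChunkB (pvEnum 0 chunk_ids)

-- ===== PRECONDITION & SPEC =====
def Spec_chunks_to_ranges_py (chunk_ids : List Int) (out : List (Int × Int)) : Prop := out = chunks_to_ranges_py_alt chunk_ids
instance (chunk_ids : List Int) (out : List (Int × Int)) : Decidable (Spec_chunks_to_ranges_py chunk_ids out) := by unfold Spec_chunks_to_ranges_py; infer_instance

-- ===== CLAIM (what is proved, stated in full; the proofs are below) =====
def Claim_equal_chunks_to_ranges_py : Prop := ∀ (chunk_ids : List Int), Dom_chunks_to_ranges_py chunk_ids → Spec_chunks_to_ranges_py chunk_ids (chunks_to_ranges_py chunk_ids)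

-- ===== LEMMAS AND PROOFS =====

-- length of the maximal run of consecutive values starting at expected value v
def pvRunLen (v : Int) : List Int → Nat
  | [] => 0
  | y :: ys => if y = v then pvRunLen (v + 1) ys + 1 else 0

-- common recursive reference form of the run-length encoding
def pvGo (start run : Int) : List Int → List (Int × Int)
  | [] => [(start, run)]
  | y :: ys => if y = start + run then pvGo start (run + 1) ys
               else (start, run) :: pvGo y 1 ys

lemma pvEnum_takeWhile_len (ys : List Int) : ∀ (j d c : Int), c = d + j →
    ((pvEnum j ys).takeWhile (fun q => q.2 - q.1 = d)).length = pvRunLen c ys := by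
  induction ys with
  | nil => intro j d c _; simp [pvEnum, pvRunLen]
  | cons y ys ih =>
    intro j d c hc
    simp only [pvEnum, List.takeWhile_cons, pvRunLen]
    by_cases h : y = c
    · subst h
      have hd : (y : Int) - j = d := by omega
      simp [hd, ih (j + 1) d (y + 1) (by omega)]
    · have hd : ¬ ((y : Int) - j = d) := by omega
      simp [hd, h]

lemma pvEnum_dropWhile (ys : List Int) : ∀ (j d c : Int), c = d + j →
    (pvEnum j ys).dropWhile (fun q => q.2 - q.1 = d)
      = pvEnum (j + pvRunLen c ys) (ys.drop (pvRunLen c ys)) := by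
  induction ys with
  | nil => intro j d c _; simp [pvEnum, pvRunLen]
  | cons y ys ih =>
    intro j d c hc
    simp only [pvEnum, List.dropWhile_cons, pvRunLen]
    by_cases h : y = c
    · have hd : (y : Int) - j = d := by omega
      rw [if_pos h, ih (j + 1) d (c + 1) (by omega)]
      rw [show (j + ((pvRunLen (c + 1) ys : Nat) + 1 : Nat) : Int)
            = j + 1 + (pvRunLen (c + 1) ys : Nat) by push_cast; ring]
      simp [hd, List.drop_succ_cons]
    · have hd : ¬ ((y : Int) - j = d) := by omega
      simp [hd, h, pvEnum]

lemma pvGo_eq : ∀ (ys : List Int) (x r : Int), pvGo x r ys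
    = (x, r + (pvRunLen (x + r) ys : Int))
        :: (match ys.drop (pvRunLen (x + r) ys) with
            | [] => []
            | y :: rest => pvGo y 1 rest) := by
  intro ys
  induction ys with
  | nil => intro x r; simp [pvGo, pvRunLen]
  | cons y ys ih =>
    intro x r
    simp only [pvGo, pvRunLen]
    by_cases h : y = x + r
    · rw [if_pos h, if_pos h, ih x (r + 1)]
      have h1 : x + (r + 1) = x + r + 1 := by ring
      have h2 : (r + ((pvRunLen (x + r + 1) ys : Nat) + 1 : Nat) : Int)
          = r + 1 + (pvRunLen (x + r + 1) ys : Nat) := by push_cast; ring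
      rw [h1, h2]
      simp [List.drop_succ_cons]
    · rw [if_neg h, if_neg h]
      simp

lemma pvChunkB_eq_go : ∀ (fuel : Nat) (xs : List Int), xs.length ≤ fuel →
    ∀ (i x : Int), pvChunkB (pvEnum i (x :: xs)) = pvGo x 1 xs := by
  intro fuel
  induction fuel with
  | zero =>
    intro xs hxs i x
    have : xs = [] := List.length_eq_zero_iff.mp (Nat.le_zero.mp hxs)
    subst this
    simp [pvEnum, pvChunkB, pvGo]
  | succ n ih =>
    intro xs hxs i x
    rw [show pvEnum i (x :: xs) = (i, x) :: pvEnum (i + 1) xs from rfl, pvChunkB]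
    rw [pvEnum_takeWhile_len xs (i + 1) (x - i) (x + 1) (by ring),
        pvEnum_dropWhile xs (i + 1) (x - i) (x + 1) (by ring)]
    rw [pvGo_eq xs x 1]
    cases hdrop : xs.drop (pvRunLen (x + 1) xs) with
    | nil => simp [pvEnum, pvChunkB]
    | cons y rest =>
      have hlen : rest.length ≤ n := by
        have h1 := List.length_drop (l := xs) (i := pvRunLen (x + 1) xs)
        rw [hdrop] at h1
        simp only [List.length_cons] at h1
        omega
      rw [ih rest hlen _ y]

lemma pvFoldA_eq_go : ∀ (xs : List Int) (acc : List (Int × Int)) (s r : Int),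
    (let st := xs.foldl pvStepA (acc, s, r); st.1 ++ [(st.2.1, st.2.2)])
      = acc ++ pvGo s r xs := by
  intro xs
  induction xs with
  | nil => intro acc s r; simp [pvGo]
  | cons y ys ih =>
    intro acc s r
    simp only [List.foldl_cons, pvStepA, pvGo]
    by_cases h : y = s + r
    · rw [if_pos h, if_pos h]; exact ih acc s (r + 1)
    · rw [if_neg h, if_neg h]
      have := ih (acc ++ [(s, r)]) y 1
      simpa using this

-- ===== VERDICT (by name: the statement is the Claim_ definition above) =====
theorem chunks_to_ranges_py_spec : Claim_equal_chunks_to_ranges_py := by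
  intro xs _
  unfold Spec_chunks_to_ranges_py chunks_to_ranges_py chunks_to_ranges_py_alt
  cases xs with
  | nil => simp [pvEnum, pvChunkB]
  | cons x rest =>
    rw [pvChunkB_eq_go rest.length rest (le_refl _) 0 x]
    simpa using pvFoldA_eq_go rest [] x 1
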